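-- pv_equiv track=rewrite | github.com/pechom/Diplomka | feature_extraction.py | header_from_selection
-- ===== SOURCE A (Python) =====
-- def header_from_selection(selected, variance_selected, message):
--     header = []
--     if len(selected) != 0:
--         for i in range(len(selected)):
--             if i in variance_selected:
--                 header.append(selected[i])
--         if len(selected) in variance_selected:
--             if message != "":
--                 header.append(message)
--         header = header_clearing(header)
--     return header
--
-- def header_clearing(header):
--     for i in range(len(header)):
--         for ch in ['\\', ',', '\'', '\"', '\a', '\b', '\f', '\n', '\r', '\t', '\v', '\0', '\1', '\2', '\3', '\4', '\5',
--                    '\6', '\7']: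
--             if ch in header[i]:
--                 header[i] = header[i].replace(ch, '?')
--     return header
-- ===== SOURCE B (Python) =====
-- BAD = set('\\,\'"\a\b\f\n\r\t\v\0\1\2\3\4\5\6\7')
--
--
-- def header_from_selection(selected, variance_selected, message):
--     if not selected:
--         return []
--     n = len(selected)
--     header = []
--     for j in sorted(set(variance_selected)):
--         if 0 <= j < n:
--             header.append(selected[j])
--         elif j == n and message != "":
--             header.append(message)
--     return [''.join('?' if c in BAD else c for c in s) for s in header]
-- ===== Notes on version B (the rewrite author's own statement) =====
-- stated objective: alternative
-- what changed: B iterates over sorted(set(variance_selected)) restricted to valid indices instead of scanning every position of selected and testing list membership, and sanitizes by a single per-character translation instead of an in-place index loop of repeated str.replace calls.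
import Mathlib
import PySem

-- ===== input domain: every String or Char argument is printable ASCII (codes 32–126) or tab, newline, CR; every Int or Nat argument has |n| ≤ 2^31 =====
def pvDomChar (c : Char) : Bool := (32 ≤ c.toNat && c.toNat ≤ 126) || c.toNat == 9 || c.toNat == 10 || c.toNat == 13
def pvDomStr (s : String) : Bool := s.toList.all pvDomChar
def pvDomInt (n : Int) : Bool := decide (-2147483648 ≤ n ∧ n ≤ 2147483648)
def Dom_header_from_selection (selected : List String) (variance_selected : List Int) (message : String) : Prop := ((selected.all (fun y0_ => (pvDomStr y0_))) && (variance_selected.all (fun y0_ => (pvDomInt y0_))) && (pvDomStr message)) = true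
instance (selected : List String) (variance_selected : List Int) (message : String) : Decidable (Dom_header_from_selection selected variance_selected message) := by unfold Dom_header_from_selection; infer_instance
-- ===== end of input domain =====

-- B iterates the sorted distinct indices of variance_selected directly (instead of scanning every
-- position of selected and testing list membership) and sanitizes via one per-character translation
-- (instead of an in-place index loop of conditional str.replace calls); objective: alternative, same output.
-- ===== PORT A =====
-- header_clearing: in-place index loop replacing each special character by '?' (port of the helper)
def pvChListA : List String :=
  ["\\", ",", "'", "\"", "\x07", "\x08", "\x0c", "\n", "\r", "\t", "\x0b",
   "\x00", "\x01", "\x02", "\x03", "\x04", "\x05", "\x06", "\x07"]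

def header_clearing (header : List String) : List String :=
  (PySem.List.pyRange 0 (header.length : Int)).foldl
    (fun h i =>
      pvChListA.foldl
        (fun h ch =>
          if PySem.Str.isIn ch (PySem.List.pyGetD h i "") then
            PySem.List.pySetD h i (PySem.Str.replace (PySem.List.pyGetD h i "") ch "?")
          else h) h)
    header

def header_from_selection (selected : List String) (variance_selected : List Int) (message : String) : List String :=
  let header : List String := []
  if selected.length ≠ 0 then
    let header := (PySem.List.pyRange 0 (selected.length : Int)).foldl
      (fun h i => if i ∈ variance_selected then h ++ [PySem.List.pyGetD selected i ""] else h) header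
    let header := if (selected.length : Int) ∈ variance_selected then
        (if message ≠ "" then header ++ [message] else header)
      else header
    header_clearing header
  else header

-- ===== PORT B =====
-- B: iterate the sorted distinct indices directly; sanitize by one per-character translation
def pvBadSet : List Char :=
  PySem.Set.ofList ("\\,'\"\x07\x08\x0c\n\r\t\x0b\x00\x01\x02\x03\x04\x05\x06\x07".toList)

def pvClean (s : String) : String :=
  String.ofList (s.toList.map (fun c => if c ∈ pvBadSet then '?' else c))

def header_from_selection_alt (selected : List String) (variance_selected : List Int) (message : String) : List String :=
  if selected = [] then []
  else
    let n : Int := selected.length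
    let header := (PySem.List.sorted (PySem.Set.ofList variance_selected) (fun x => x) false).foldl
      (fun h j =>
        if 0 ≤ j ∧ j < n then h ++ [PySem.List.pyGetD selected j ""]
        else if j = n ∧ message ≠ "" then h ++ [message]
        else h) []
    header.map pvClean

-- ===== PRECONDITION & SPEC =====
def Spec_header_from_selection (selected : List String) (variance_selected : List Int) (message : String) (out : List String) : Prop := out = header_from_selection_alt selected variance_selected message
instance (selected : List String) (variance_selected : List Int) (message : String) (out : List String) : Decidable (Spec_header_from_selection selected variance_selected message out) := by unfold Spec_header_from_selection; infer_instance

-- ===== CLAIM (what is proved, stated in full; the proofs are below) =====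
def Claim_equal_header_from_selection : Prop := ∀ (selected : List String) (variance_selected : List Int) (message : String), Dom_header_from_selection selected variance_selected message → Spec_header_from_selection selected variance_selected message (header_from_selection selected variance_selected message)

-- ===== LEMMAS AND PROOFS =====
-- L0: pyRange 0 n = map ofNat (range n)
theorem pvPyRange_zero (n : Nat) : PySem.List.pyRange 0 (n : Int) = (List.range n).map Int.ofNat := by
  induction n with
  | zero => simp [PySem.List.pyRange]
  | succ n ih =>
    have h1 : PySem.List.pyRange 0 ((n+1 : Nat) : Int) = PySem.List.pyRange 0 (n : Int) ++ PySem.List.pyRange (n : Int) ((n+1 : Nat) : Int) := by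
      apply PySem.List.pyRange_one_append <;> push_cast <;> omega
    have h2 : PySem.List.pyRange (n : Int) ((n+1 : Nat) : Int) = [(n : Int)] := by
      rw [PySem.List.pyRange_one_cons (by push_cast; omega)]
      have : ((n : Int) + 1) = ((n+1 : Nat) : Int) := by push_cast; ring
      rw [this]
      simp [PySem.List.pyRange]
    rw [h1, h2, ih, List.range_succ]
    simp

theorem pvGo_single (c q : Char) : ∀ (l : List Char) (fuel : Nat) (acc : List Char), l.length ≤ fuel →
    PySem.Chars.replace.go [c] [q] fuel l acc = acc.reverse ++ l.map (fun x => if x = c then q else x) := by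
  intro l
  induction l with
  | nil =>
    intro fuel acc _
    cases fuel <;> simp [PySem.Chars.replace.go]
  | cons c' t ih =>
    intro fuel acc hf
    cases fuel with
    | zero => simp at hf
    | succ fuel =>
      rw [PySem.Chars.replace.go]
      by_cases h : c = c'
      · subst h
        simp only [List.isPrefixOf, BEq.rfl, Bool.true_and, if_true, List.length_cons,
          List.length_nil, Nat.zero_add, List.drop_one, List.tail_cons]
        rw [ih fuel _ (by simpa using hf)]
        simp
      · have : List.isPrefixOf [c] (c' :: t) = false := by
          simp [List.isPrefixOf]; exact fun hcc => absurd hcc h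
        rw [this]
        simp only [Bool.false_eq_true, if_false]
        rw [ih fuel _ (by simpa using hf)]
        simp only [List.map_cons, if_neg (fun hc : c' = c => h hc.symm)]
        simp

theorem pvReplace_single (c q : Char) (l : List Char) :
    PySem.Chars.replace l [c] [q] = l.map (fun x => if x = c then q else x) := by
  rw [PySem.Chars.replace]
  simp only [List.isEmpty_cons, Bool.false_eq_true, if_false]
  exact (pvGo_single c q l l.length [] (le_refl _)).trans (by simp)

theorem pvSingleton_infix (c : Char) (l : List Char) : [c] <:+: l ↔ c ∈ l := by
  constructor
  · intro h
    exact (List.singleton_sublist).1 h.sublist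
  · intro h
    obtain ⟨s, t, rfl⟩ := List.append_of_mem h
    exact ⟨s, t, by simp⟩

-- the inner char-replacement loop over a list of chars is a per-character translation
theorem pvCharsFold (cs : List Char) : ∀ (l : List Char),
    cs.foldl (fun l c => if PySem.Chars.isIn [c] l then PySem.Chars.replace l [c] ['?'] else l) l
      = l.map (fun x => if x ∈ cs then '?' else x) := by
  induction cs with
  | nil => intro l; simp
  | cons c cs ih =>
    intro l
    have hstep : (if PySem.Chars.isIn [c] l then PySem.Chars.replace l [c] ['?'] else l)
        = l.map (fun x => if x = c then '?' else x) := by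
      by_cases h : PySem.Chars.isIn [c] l
      · rw [if_pos h, pvReplace_single]
      · rw [if_neg h]
        have hc : c ∉ l := by
          intro hmem
          exact h ((PySem.Chars.isIn_iff_infix [c] l).2 ((pvSingleton_infix c l).2 hmem))
        conv_lhs => rw [← List.map_id l]
        apply List.map_congr_left
        intro x hx
        simp only [id]
        rw [if_neg (fun hxc : x = c => hc (hxc ▸ hx))]
    rw [List.foldl_cons, hstep, ih, List.map_map]
    apply List.map_congr_left
    intro x _
    simp only [Function.comp]
    by_cases hxc : x = c
    · subst hxc; simp
    · rw [if_neg hxc]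
      by_cases hxs : x ∈ cs
      · simp [hxs]
      · simp [hxs, hxc]


-- the A-side sanitisation of one string
def pvCleanA (s : String) : String :=
  pvChListA.foldl (fun s ch => if PySem.Str.isIn ch s then PySem.Str.replace s ch "?" else s) s

def pvCharsA : List Char :=
  ['\\', ',', '\'', '"', '\x07', '\x08', '\x0c', '\n', '\r', '\t', '\x0b',
   '\x00', '\x01', '\x02', '\x03', '\x04', '\x05', '\x06', '\x07']

theorem pvChListA_eq : pvChListA = pvCharsA.map (fun c => String.ofList [c]) := by decide

theorem pvStrFold_toList : ∀ (cs : List Char) (s : String),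
    ((cs.map (fun c => String.ofList [c])).foldl
      (fun s ch => if PySem.Str.isIn ch s then PySem.Str.replace s ch "?" else s) s).toList
    = cs.foldl (fun l c => if PySem.Chars.isIn [c] l then PySem.Chars.replace l [c] ['?'] else l) s.toList := by
  intro cs
  induction cs with
  | nil => intro s; simp
  | cons c cs ih =>
    intro s
    simp only [List.map_cons, List.foldl_cons]
    rw [ih]
    congr 1
    have hb : PySem.Str.isIn (String.ofList [c]) s = PySem.Chars.isIn [c] s.toList := by
      simp
    by_cases h : PySem.Chars.isIn [c] s.toList
    · rw [if_pos (by rw [hb]; exact h), if_pos h, PySem.Str.toList_replace]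
      congr 1 <;> simp
    · rw [if_neg (by rw [hb]; exact h), if_neg h]

theorem pvCleanA_eq_pvClean (s : String) : pvCleanA s = pvClean s := by
  apply String.toList_inj.mp
  rw [pvCleanA, pvChListA_eq, pvStrFold_toList, pvCharsFold, pvClean]
  simp only [String.toList_ofList]
  apply List.map_congr_left
  intro x _
  have hset : ∀ y : Char, y ∈ pvBadSet ↔ y ∈ pvCharsA := by
    intro y
    have hlist : ("\\,'\"\x07\x08\x0c\n\r\t\x0b\x00\x01\x02\x03\x04\x05\x06\x07".toList) = pvCharsA := by decide
    rw [pvBadSet, PySem.Set.mem_ofList, hlist]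
  by_cases hx : x ∈ pvCharsA
  · rw [if_pos hx, if_pos ((hset x).2 hx)]
  · rw [if_neg hx, if_neg (fun hmem => hx ((hset x).1 hmem))]

theorem pvInnerLoop (chs : List String) : ∀ (h : List String) (i : Nat), i < h.length →
    chs.foldl (fun h ch =>
        if PySem.Str.isIn ch (PySem.List.pyGetD h (i : Int) "") then
          PySem.List.pySetD h (i : Int) (PySem.Str.replace (PySem.List.pyGetD h (i : Int) "") ch "?")
        else h) h
    = h.set i (chs.foldl (fun s ch => if PySem.Str.isIn ch s then PySem.Str.replace s ch "?" else s) (h.getD i "")) := by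
  induction chs with
  | nil =>
    intro h i hi
    simp only [List.foldl_nil]
    apply List.ext_getElem (by simp)
    intro k hk _
    rw [List.getElem_set]
    split
    · next hki => subst hki; rw [List.getD_eq_getElem h "" hi]
    · rfl
  | cons ch chs ih =>
    intro h i hi
    rw [List.foldl_cons, List.foldl_cons]
    rw [PySem.List.pyGetD_natCast h i ""]
    by_cases hin : PySem.Str.isIn ch (h.getD i "")
    · rw [if_pos hin, if_pos hin, PySem.List.pySetD_natCast]
      rw [ih (h.set i (PySem.Str.replace (h.getD i "") ch "?")) i (by simpa using hi)]
      rw [List.set_set]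
      congr 1
      rw [List.getD_eq_getElem _ "" (by simpa using hi), List.getElem_set_self]
    · rw [if_neg hin, if_neg hin]
      exact ih h i hi

theorem pvMixGet (g : String → String) (h : List String) (j k : Nat) (hj : j ≤ h.length) (hk : k < h.length) :
    ((h.take j).map g ++ h.drop j)[k]'(by simp; omega) = if k < j then g (h[k]'hk) else h[k]'hk := by
  by_cases hkj : k < j
  · rw [List.getElem_append_left (by simp; omega), if_pos hkj, List.getElem_map, List.getElem_take]
  · rw [List.getElem_append_right (by simp; omega), if_neg hkj, List.getElem_drop]
    simp only [List.length_map, List.length_take, Nat.min_eq_left hj,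
      Nat.add_sub_cancel' (Nat.le_of_not_lt hkj)]

theorem pvClearFold : ∀ (n : Nat) (h : List String), n ≤ h.length →
    ((List.range n).map Int.ofNat).foldl
      (fun h i =>
        pvChListA.foldl (fun h ch =>
          if PySem.Str.isIn ch (PySem.List.pyGetD h i "") then
            PySem.List.pySetD h i (PySem.Str.replace (PySem.List.pyGetD h i "") ch "?")
          else h) h) h
    = (h.take n).map pvCleanA ++ h.drop n := by
  intro n
  induction n with
  | zero => intro h _; simp
  | succ n ih =>
    intro h hn
    rw [List.range_succ, List.map_append, List.foldl_append, ih h (by omega)]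
    simp only [List.map_cons, List.map_nil, List.foldl_cons, List.foldl_nil]
    have hlen : ((h.take n).map pvCleanA ++ h.drop n).length = h.length := by simp; omega
    have hcast : (Int.ofNat n) = ((n : Nat) : Int) := rfl
    rw [hcast, pvInnerLoop pvChListA ((h.take n).map pvCleanA ++ h.drop n) n (by rw [hlen]; omega)]
    have hgd : ((h.take n).map pvCleanA ++ h.drop n).getD n "" = h.getD n "" := by
      rw [List.getD_eq_getElem _ "" (by rw [hlen]; omega), List.getD_eq_getElem _ "" (by omega)]
      rw [pvMixGet pvCleanA h n n (by omega) (by omega), if_neg (lt_irrefl n)]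
    rw [hgd]
    apply List.ext_getElem (by rw [List.length_set, hlen]; simp; omega)
    intro k hk1 hk2
    rw [List.getElem_set]
    have hkh : k < h.length := by rw [List.length_set, hlen] at hk1; exact hk1
    have hL : ((h.take n).map pvCleanA ++ h.drop n)[k]'(by rw [hlen]; exact hkh)
        = if k < n then pvCleanA (h[k]'hkh) else h[k]'hkh := pvMixGet pvCleanA h n k (by omega) hkh
    have hR : ((h.take (n+1)).map pvCleanA ++ h.drop (n+1))[k]'hk2
        = if k < n+1 then pvCleanA (h[k]'hkh) else h[k]'hkh := pvMixGet pvCleanA h (n+1) k (by omega) hkh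
    rw [hR]
    by_cases hkn : n = k
    · subst hkn
      rw [if_pos rfl, if_pos (by omega), List.getD_eq_getElem _ "" hkh]
      rfl
    · rw [if_neg hkn, hL]
      by_cases hlt : k < n
      · rw [if_pos hlt, if_pos (by omega)]
      · rw [if_neg hlt, if_neg (by omega)]

theorem pvHeader_clearing_eq_map (h : List String) : header_clearing h = h.map pvCleanA := by
  rw [header_clearing, pvPyRange_zero, pvClearFold h.length h (le_refl _)]
  simp

-- two strictly increasing integer lists with the same members are equal
theorem pvEq_of_pairwise_lt : ∀ (l1 l2 : List Int), l1.Pairwise (· < ·) → l2.Pairwise (· < ·) →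
    (∀ x, x ∈ l1 ↔ x ∈ l2) → l1 = l2 := by
  intro l1
  induction l1 with
  | nil =>
    intro l2 _ _ hmem
    cases l2 with
    | nil => rfl
    | cons b t2 => exact absurd ((hmem b).2 List.mem_cons_self) (List.not_mem_nil)
  | cons a t1 ih =>
    intro l2 h1 h2 hmem
    cases l2 with
    | nil => exact absurd ((hmem a).1 List.mem_cons_self) (List.not_mem_nil)
    | cons b t2 =>
      have hab : a = b := by
        rcases (List.mem_cons.1 ((hmem a).1 List.mem_cons_self)) with h | h
        · exact h
        · rcases (List.mem_cons.1 ((hmem b).2 List.mem_cons_self)) with h' | h'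
          · exact h'.symm
          · have := (List.pairwise_cons.1 h1).1 b h'
            have := (List.pairwise_cons.1 h2).1 a h
            omega
      subst hab
      have htails : ∀ x, x ∈ t1 ↔ x ∈ t2 := by
        intro x
        constructor
        · intro hx
          have hax := (List.pairwise_cons.1 h1).1 x hx
          rcases List.mem_cons.1 ((hmem x).1 (List.mem_cons_of_mem a hx)) with h | h
          · omega
          · exact h
        · intro hx
          have hax := (List.pairwise_cons.1 h2).1 x hx
          rcases List.mem_cons.1 ((hmem x).2 (List.mem_cons_of_mem a hx)) with h | h
          · omega
          · exact h
      rw [ih t2 (List.pairwise_cons.1 h1).2 (List.pairwise_cons.1 h2).2 htails]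

theorem pvFlatMap_filter {α : Type} (g : α → List String) (p : α → Bool) :
    ∀ l : List α, (∀ x ∈ l, p x = false → g x = []) → l.flatMap g = (l.filter p).flatMap g := by
  intro l
  induction l with
  | nil => intro _; rfl
  | cons a t ih =>
    intro hz
    rw [List.flatMap_cons, List.filter_cons]
    by_cases hp : p a
    · rw [if_pos hp, List.flatMap_cons, ih (fun x hx => hz x (List.mem_cons_of_mem a hx))]
    · rw [if_neg (by simpa using hp), hz a List.mem_cons_self (by simpa using hp),
        ih (fun x hx => hz x (List.mem_cons_of_mem a hx))]
      simp


theorem pvFlatMap_singleton {α : Type} (g : α → List String) (f : α → String) :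
    ∀ l : List α, (∀ x ∈ l, g x = [f x]) → l.flatMap g = l.map f := by
  intro l
  induction l with
  | nil => intro _; rfl
  | cons a t ih =>
    intro hs
    rw [List.flatMap_cons, List.map_cons, hs a List.mem_cons_self,
      ih (fun x hx => hs x (List.mem_cons_of_mem a hx))]
    rfl

theorem pvMain (selected : List String) (variance_selected : List Int) (message : String) :
    header_from_selection selected variance_selected message
      = header_from_selection_alt selected variance_selected message := by
  by_cases hsel : selected = []
  · subst hsel
    simp [header_from_selection, header_from_selection_alt]
  · have hN : selected.length ≠ 0 := by simpa using fun h => hsel (List.eq_nil_of_length_eq_zero h)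
    rw [header_from_selection, header_from_selection_alt]
    simp only [if_neg (by simpa using hsel), if_pos hN]
    have hMfold : (PySem.List.pyRange 0 ((selected.length : Nat) : Int)).foldl
        (fun h i => if i ∈ variance_selected then h ++ [PySem.List.pyGetD selected i ""] else h) []
        = ((List.range selected.length).filter
              (fun k => decide (((k : Nat) : Int) ∈ variance_selected))).map
            (fun k => PySem.List.pyGetD selected ((k : Nat) : Int) "") := by
      rw [pvPyRange_zero,
        PySem.List.foldl_append_ite (p := fun i => i ∈ variance_selected)
          (f := fun i => PySem.List.pyGetD selected i ""), List.filter_map, List.map_map]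
      simp only [List.nil_append, Function.comp_def, Int.ofNat_eq_natCast]
    rw [hMfold]
    set M : List String :=
      ((List.range selected.length).filter
          (fun k => decide (((k : Nat) : Int) ∈ variance_selected))).map
        (fun k => PySem.List.pyGetD selected ((k : Nat) : Int) "") with hM
    set T : List String :=
      if ((selected.length : Int) ∈ variance_selected ∧ message ≠ "") then [message] else [] with hT
    have hifs : (if (selected.length : Int) ∈ variance_selected then
          if message ≠ "" then M ++ [message] else M
        else M) = M ++ T := by
      by_cases h1 : (selected.length : Int) ∈ variance_selected
      · by_cases h2 : message = "" <;> simp [h1, h2, hT]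
      · simp [h1, hT]
    rw [hifs, pvHeader_clearing_eq_map]
    have hcl : (M ++ T).map pvCleanA = (M ++ T).map pvClean :=
      List.map_congr_left (fun s _ => pvCleanA_eq_pvClean s)
    rw [hcl]
    -- B side: the fold over the sorted distinct indices builds the same list M ++ T
    congr 1
    set gB : Int → List String := fun j =>
      if 0 ≤ j ∧ j < (selected.length : Int) then [PySem.List.pyGetD selected j ""]
      else if j = (selected.length : Int) ∧ message ≠ "" then [message] else [] with hgB
    set S : List Int := PySem.List.sorted (PySem.Set.ofList variance_selected) (fun x => x) with hS
    have hb1 : S.foldl (fun h j =>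
          if 0 ≤ j ∧ j < (selected.length : Int) then h ++ [PySem.List.pyGetD selected j ""]
          else if j = (selected.length : Int) ∧ message ≠ "" then h ++ [message] else h) []
        = S.flatMap gB := by
      have hcong := PySem.List.foldl_congr_mem
        (l := S) (init := ([] : List String))
        (f := fun h j =>
          if 0 ≤ j ∧ j < (selected.length : Int) then h ++ [PySem.List.pyGetD selected j ""]
          else if j = (selected.length : Int) ∧ message ≠ "" then h ++ [message] else h)
        (g := fun h j => h ++ gB j)
        (by intro acc x _
            dsimp only
            rw [hgB]
            dsimp only
            split_ifs <;> simp)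
      rw [hcong, PySem.List.foldl_append_eq_flatMap, List.nil_append]
    rw [hb1]
    set p : Int → Bool := fun j => decide (0 ≤ j ∧ j ≤ (selected.length : Int)) with hp
    have hb2 : S.flatMap gB = (S.filter p).flatMap gB := by
      apply pvFlatMap_filter
      intro x _ hpx
      rw [hp] at hpx
      simp only [decide_eq_false_iff_not, not_and, not_le] at hpx
      rw [hgB]
      dsimp only
      rw [if_neg (by omega), if_neg (by rintro ⟨rfl, -⟩; omega)]
    rw [hb2]
    set L : List Int :=
      ((List.range (selected.length + 1)).filter
          (fun k => decide (((k : Nat) : Int) ∈ variance_selected))).map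
        (fun k => ((k : Nat) : Int)) with hL
    have hb3 : S.filter p = L := by
      apply pvEq_of_pairwise_lt
      · exact (PySem.List.sorted_ofList_pairwise_lt variance_selected).filter p
      · rw [hL]
        exact ((List.pairwise_lt_range).filter
            (fun k => decide (((k : Nat) : Int) ∈ variance_selected))).map _
          (fun a b hab => by exact_mod_cast hab)
      · intro x
        rw [hS, hL]
        simp only [List.mem_filter, PySem.List.mem_sorted, PySem.Set.mem_ofList, List.mem_map,
          List.mem_range, hp, decide_eq_true_eq]
        constructor
        · rintro ⟨hxv, hx0, hxn⟩
          exact ⟨x.toNat, ⟨by omega, by rw [Int.toNat_of_nonneg hx0]; exact hxv⟩,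
            Int.toNat_of_nonneg hx0⟩
        · rintro ⟨k, ⟨hk, hkv⟩, rfl⟩
          exact ⟨hkv, by omega, by omega⟩
    rw [hb3, hL, List.range_succ, List.filter_append, List.map_append, List.flatMap_append]
    congr 1
    · -- indices below len: each contributes the selected entry
      rw [List.flatMap_map, hM]
      symm
      apply pvFlatMap_singleton
      intro k hk
      rw [List.mem_filter, List.mem_range] at hk
      rw [hgB]
      dsimp only
      rw [if_pos (by constructor <;> omega)]
    · -- the index equal to len contributes the message (when present and message nonempty)
      rw [hT]
      by_cases h1 : (selected.length : Int) ∈ variance_selected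
      · simp only [List.filter_cons, List.filter_nil, decide_eq_true_eq, if_pos h1]
        simp only [List.map_cons, List.map_nil, List.flatMap_cons, List.flatMap_nil, List.append_nil]
        rw [hgB]
        dsimp only
        rw [if_neg (show ¬((0:Int) ≤ (selected.length : Int) ∧
            (selected.length : Int) < (selected.length : Int)) by omega)]
        by_cases h2 : message = "" <;> simp [h1, h2]
      · simp [h1]

theorem header_from_selection_spec : Claim_equal_header_from_selection := by
  intro selected variance_selected message _
  unfold Spec_header_from_selection
  exact pvMain selected variance_selected message
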